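-- pv_equiv track=rewrite | github.com/EZDevanshu/Leet_Code | Leet_3912.py | findValidElements
-- ===== SOURCE A (Python) =====
-- def findValidElements(nums: list[int]) -> list[int]:
--     n = len(nums)
--     ans = []
--
--     for i in range(n) :
--         left = True
--         for j in range(i):
--             if nums[j] >= nums[i]:
--                 left = False
--                 break
--
--         right = True
--         for j in range(i + 1 , n):
--             if nums[j] >= nums[i]:
--                 right = False
--                 break
--
--         if left or right :
--             ans.append(nums[i])
--
--     return ans
-- ===== SOURCE B (Python) =====
-- def findValidElements(nums: list[int]) -> list[int]:
--     n = len(nums)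
--     # suffix maxima: suf[i] = max(nums[i+1:]) or None
--     suf = [None] * n
--     m = None
--     for i in range(n - 1, -1, -1):
--         suf[i] = m
--         if m is None or nums[i] > m:
--             m = nums[i]
--     ans = []
--     p = None  # running max of nums[:i]
--     for i, v in enumerate(nums):
--         left = p is None or v > p
--         right = suf[i] is None or v > suf[i]
--         if left or right:
--             ans.append(v)
--         if p is None or v > p:
--             p = v
--     return ans
-- ===== Notes on version B (the rewrite author's own statement) =====
-- stated objective: faster
-- what changed: Replaced the quadratic per-element left/right scans by a single backward pass building suffix maxima plus one forward pass with a running prefix maximum, so each element is checked in O(1).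
import Mathlib
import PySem

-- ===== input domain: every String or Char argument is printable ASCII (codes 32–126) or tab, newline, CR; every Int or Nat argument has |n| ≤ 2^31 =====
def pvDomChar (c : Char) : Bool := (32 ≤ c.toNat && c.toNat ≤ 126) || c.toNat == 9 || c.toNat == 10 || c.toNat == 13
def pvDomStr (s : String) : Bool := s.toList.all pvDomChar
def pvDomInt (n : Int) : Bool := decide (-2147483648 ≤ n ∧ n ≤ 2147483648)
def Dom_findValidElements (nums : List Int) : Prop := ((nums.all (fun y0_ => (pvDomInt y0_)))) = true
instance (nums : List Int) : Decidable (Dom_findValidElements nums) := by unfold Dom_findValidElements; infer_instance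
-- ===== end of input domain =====

-- B replaces A's quadratic per-element left/right scans by one suffix-max pass plus a running
-- prefix max (O(n)); a timing run measures the speed-up.

-- ===== PORT A =====
-- inner 'for j in range(...): if nums[j] >= nums[i]: flag = False; break'
def pvInnerA (nums : List Int) (v : Int) : List Int → Bool
  | [] => true
  | j :: rest => if v ≤ PySem.List.pyGetD nums j 0 then false else pvInnerA nums v rest

def findValidElements (nums : List Int) : List Int :=
  let n : Int := nums.length
  (PySem.List.pyRange 0 n 1).foldl (fun ans i =>
    let left := pvInnerA nums (PySem.List.pyGetD nums i 0) (PySem.List.pyRange 0 i 1)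
    let right := pvInnerA nums (PySem.List.pyGetD nums i 0) (PySem.List.pyRange (i + 1) n 1)
    if left || right then ans ++ [PySem.List.pyGetD nums i 0] else ans) []

-- ===== PORT B =====
-- backward pass of Source B: returns (suf list: max of strict suffix at each index, running max m)
def pvSufAux : List Int → List (Option Int) × Option Int
  | [] => ([], none)
  | x :: rest =>
    let r := pvSufAux rest
    (r.2 :: r.1, some (match r.2 with | none => x | some m => if x > m then x else m))

-- forward pass of Source B: p = running prefix max
def pvFwd : List Int → List (Option Int) → Option Int → List Int
  | [], _, _ => []
  | _ :: _, [], _ => []   -- unreachable: suffix list has the same length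
  | v :: vs, s :: ss, p =>
    let left := match p with | none => true | some pm => decide (pm < v)
    let right := match s with | none => true | some sm => decide (sm < v)
    let p' := match p with | none => some v | some pm => if pm < v then some v else some pm
    (if left || right then [v] else []) ++ pvFwd vs ss p'

def findValidElements_alt (nums : List Int) : List Int :=
  pvFwd nums (pvSufAux nums).1 none

-- ===== PRECONDITION & SPEC =====
def Spec_findValidElements (nums : List Int) (out : List Int) : Prop := out = findValidElements_alt nums
instance (nums : List Int) (out : List Int) : Decidable (Spec_findValidElements nums out) := by unfold Spec_findValidElements; infer_instance

-- ===== CLAIM (what is proved, stated in full; the proofs are below) =====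
def Claim_equal_findValidElements : Prop := ∀ (nums : List Int), Dom_findValidElements nums → Spec_findValidElements nums (findValidElements nums)

-- ===== LEMMAS AND PROOFS =====

-- reference: recursion over the list carrying the optional prefix maximum p
def pvOptLt : Option Int → Int → Bool
  | none, _ => true
  | some m, v => decide (m < v)

def pvUpd (p : Option Int) (v : Int) : Option Int :=
  match p with | none => some v | some pm => if pm < v then some v else some pm

def pvRef (p : Option Int) : List Int → List Int
  | [] => []
  | v :: vs =>
    (if pvOptLt p v || vs.all (fun x => decide (x < v)) then [v] else []) ++
    pvRef (pvUpd p v) vs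

lemma pvOptLt_sufAux (l : List Int) (v : Int) :
    pvOptLt (pvSufAux l).2 v = l.all (fun x => decide (x < v)) := by
  induction l with
  | nil => rfl
  | cons x xs ih =>
    simp only [pvSufAux, List.all_cons, ← ih]
    rcases h : (pvSufAux xs).2 with _ | m
    · simp [pvOptLt]
    · simp only [pvOptLt]
      by_cases hx : x > m <;> simp [hx] <;> omega

lemma pvFwd_eq_ref (l : List Int) (p : Option Int) :
    pvFwd l (pvSufAux l).1 p = pvRef p l := by
  induction l generalizing p with
  | nil => rfl
  | cons v vs ih =>
    simp only [pvSufAux, pvFwd, pvRef, ih]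
    have h := pvOptLt_sufAux vs v
    rcases hs : (pvSufAux vs).2 with _ | m <;> rw [hs] at h <;>
      simp only [pvOptLt] at h <;> simp [← h, pvOptLt, pvUpd] <;>
      rcases p with _ | pm <;> simp [pvOptLt, pvUpd]

lemma pvInnerA_all (nums : List Int) (v : Int) (js : List Int) :
    pvInnerA nums v js = js.all (fun j => decide (PySem.List.pyGetD nums j 0 < v)) := by
  induction js with
  | nil => rfl
  | cons j rest ih =>
    simp only [pvInnerA, List.all_cons, ih]
    by_cases h : v ≤ PySem.List.pyGetD nums j 0 <;> simp [h] <;> omega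

lemma map_prefix (pre rest : List Int) (d : Int) :
    (PySem.List.pyRange 0 (pre.length : Int) 1).map
      (fun j => PySem.List.pyGetD (pre ++ rest) j d) = pre := by
  have h : ∀ j ∈ PySem.List.pyRange 0 (pre.length : Int) 1,
      PySem.List.pyGetD (pre ++ rest) j d = PySem.List.pyGetD pre j d := by
    intro j hj
    rw [PySem.List.mem_pyRange_one] at hj
    rw [PySem.List.pyGetD_eq_getElem (pre ++ rest) d (by omega) (by simp; omega),
        PySem.List.pyGetD_eq_getElem pre d (by omega) (by omega)]
    exact List.getElem_append_left (by omega)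
  rw [List.map_congr_left h]
  exact PySem.List.map_pyGetD_pyRange_zero' pre d

lemma pvA_main (rest : List Int) : ∀ (pre : List Int) (p : Option Int),
    (∀ w, pvOptLt p w = pre.all (fun x => decide (x < w))) →
    ((PySem.List.pyRange (pre.length : Int) ((pre ++ rest).length : Int) 1).filter
       (fun i => pvInnerA (pre ++ rest) (PySem.List.pyGetD (pre ++ rest) i 0) (PySem.List.pyRange 0 i 1)
              || pvInnerA (pre ++ rest) (PySem.List.pyGetD (pre ++ rest) i 0)
                   (PySem.List.pyRange (i + 1) ((pre ++ rest).length : Int) 1))).map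
       (fun i => PySem.List.pyGetD (pre ++ rest) i 0) = pvRef p rest := by
  induction rest with
  | nil =>
    intro pre p _
    rw [List.append_nil, PySem.List.pyRange_one_eq_nil (le_refl _)]
    rfl
  | cons v vs ih =>
    intro pre p hp
    have hlen : ((pre ++ v :: vs).length : Int) = (pre.length : Int) + (vs.length : Int) + 1 := by
      simp; omega
    have hv : PySem.List.pyGetD (pre ++ v :: vs) (pre.length : Int) 0 = v := by
      rw [PySem.List.pyGetD_eq_getElem _ _ (by omega) (by simp)]
      simp
    have hleft : pvInnerA (pre ++ v :: vs) v (PySem.List.pyRange 0 (pre.length : Int) 1)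
        = pre.all (fun x => decide (x < v)) := by
      have h2 := congrArg (fun l => l.all (fun x => decide (x < v))) (map_prefix pre (v :: vs) 0)
      rw [pvInnerA_all]
      simpa [List.all_map, Function.comp] using h2
    have hright : pvInnerA (pre ++ v :: vs) v
        (PySem.List.pyRange ((pre.length : Int) + 1) ((pre ++ v :: vs).length : Int) 1)
        = vs.all (fun x => decide (x < v)) := by
      rw [pvInnerA_all]
      have hm := PySem.List.map_pyGetD_pyRange' (pre ++ v :: vs) 0
        (a := (pre.length : Int) + 1) (by omega)
      have hdrop : ((pre.length : Int) + 1).toNat = pre.length + 1 := by omega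
      rw [hdrop] at hm
      have hdrop2 : (pre ++ v :: vs).drop (pre.length + 1) = vs := by
        rw [List.append_cons, List.drop_left' (by simp)]
      rw [hdrop2] at hm
      have h2 := congrArg (fun l => l.all (fun x => decide (x < v))) hm
      simpa [List.all_map, Function.comp] using h2
    have hcons : PySem.List.pyRange (pre.length : Int) ((pre ++ v :: vs).length : Int) 1
        = (pre.length : Int) :: PySem.List.pyRange ((pre.length : Int) + 1) ((pre ++ v :: vs).length : Int) 1 := by
      apply PySem.List.pyRange_one_cons
      omega
    -- tail via ih with pre' = pre ++ [v]
    have hp' : ∀ w, pvOptLt (pvUpd p v) w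
        = (pre ++ [v]).all (fun x => decide (x < w)) := by
      intro w
      rcases p with _ | pm
      · have := hp w
        simp only [pvOptLt, pvUpd] at this ⊢
        simp [← this]
      · have := hp w
        simp only [pvOptLt, pvUpd] at this ⊢
        by_cases h : pm < v <;> simp [h, ← this] <;> omega
    have htail : ((PySem.List.pyRange ((pre.length : Int) + 1) ((pre ++ v :: vs).length : Int) 1).filter
        (fun i => pvInnerA (pre ++ v :: vs) (PySem.List.pyGetD (pre ++ v :: vs) i 0) (PySem.List.pyRange 0 i 1)
               || pvInnerA (pre ++ v :: vs) (PySem.List.pyGetD (pre ++ v :: vs) i 0)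
                    (PySem.List.pyRange (i + 1) ((pre ++ v :: vs).length : Int) 1))).map
        (fun i => PySem.List.pyGetD (pre ++ v :: vs) i 0)
        = pvRef (pvUpd p v) vs := by
      have hlen' : ((pre.length : Int) + 1) = (((pre ++ [v]).length : Int)) := by simp
      rw [List.append_cons, hlen']
      exact ih (pre ++ [v]) (pvUpd p v) hp'
    rw [hcons, List.filter_cons]
    by_cases hc : (pvOptLt p v || vs.all (fun x => decide (x < v))) = true
    · rw [if_pos (by simp only [hv, hleft, hright, ← hp v]; exact hc)]
      rw [List.map_cons, htail]
      show _ = pvRef p (v :: vs)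
      simp only [pvRef]
      rw [if_pos hc, hv]
      rfl
    · rw [if_neg (by simp only [hv, hleft, hright, ← hp v]; exact hc)]
      rw [htail]
      show _ = pvRef p (v :: vs)
      simp only [pvRef]
      rw [if_neg hc]
      simp

lemma pvA_eq_ref (nums : List Int) : findValidElements nums = pvRef none nums := by
  show (PySem.List.pyRange 0 (nums.length : Int) 1).foldl _ [] = _
  rw [PySem.List.foldl_append_if
    (fun i => pvInnerA nums (PySem.List.pyGetD nums i 0) (PySem.List.pyRange 0 i 1)
           || pvInnerA nums (PySem.List.pyGetD nums i 0)
                (PySem.List.pyRange (i + 1) (nums.length : Int) 1))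
    (fun i => PySem.List.pyGetD nums i 0), List.nil_append]
  simpa using pvA_main nums [] none (fun _ => rfl)

-- ===== VERDICT (by name: the statement is the Claim_ definition above) =====
theorem findValidElements_spec : Claim_equal_findValidElements := by
  intro nums _
  show _ = _
  rw [findValidElements_alt, pvFwd_eq_ref, pvA_eq_ref]
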